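-- pv_equiv track=rewrite | github.com/antontomusiak/TopCoder | srm670/cdgame.py | rescount
-- ===== SOURCE A (Python) =====
-- def rescount(a, b):
-- 	res = set()
-- 	for i in range(len(a)):
-- 		l1 = list(a)
-- 		l2 = list(b)
-- 		for j in range(len(b)):
-- 			l1[i], l2[j] = l2[j], l1[i]
-- 			res.add(sum(l1) * sum(l2))
-- 	return len(res)
-- ===== SOURCE B (Python) =====
-- def rescount(a, b):
--     # O(1) per pair: the cumulative swaps leave sum(l1)=sumA-a[i]+b[j] and sum(l2)=sumB+a[i]-b[j]
--     sA = sum(a)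
--     sB = sum(b)
--     return len({(sA - x + y) * (sB + x - y) for x in a for y in b})
-- ===== Notes on version B (the rewrite author's own statement) =====
-- stated objective: faster
-- what changed: Instead of materialising l1/l2 and re-summing both lists for every (i,j) pair, B precomputes sumA and sumB once and adds the closed-form product (sumA-a[i]+b[j])*(sumB+a[i]-b[j]) to a set, which is exactly what A's cumulative swap state evaluates to.
import Mathlib
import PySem

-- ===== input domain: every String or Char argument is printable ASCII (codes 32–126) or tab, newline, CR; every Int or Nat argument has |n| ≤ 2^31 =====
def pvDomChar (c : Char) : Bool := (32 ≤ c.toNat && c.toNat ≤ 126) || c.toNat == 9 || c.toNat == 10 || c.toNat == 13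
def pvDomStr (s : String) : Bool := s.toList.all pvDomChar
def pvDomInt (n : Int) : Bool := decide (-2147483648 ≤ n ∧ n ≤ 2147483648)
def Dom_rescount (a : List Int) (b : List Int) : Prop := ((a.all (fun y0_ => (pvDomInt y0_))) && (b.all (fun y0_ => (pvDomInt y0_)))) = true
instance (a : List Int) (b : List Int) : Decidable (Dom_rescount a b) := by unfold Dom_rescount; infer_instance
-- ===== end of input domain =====

-- B replaces A's per-pair list copies and re-summations by one precomputation of sum(a), sum(b)
-- and a closed-form product per pair; equal return value proved below (faster: asymptotic).

-- ===== PORT A =====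
-- body of A's inner loop: 'l1[i], l2[j] = l2[j], l1[i]; res.add(sum(l1) * sum(l2))';
-- indices i, j always come from range(len(a))/range(len(b)), so pyGetD/pySetD are exact there.
def rescountStep (i : Int) (st : List Int × List Int × PySem.Set Int) (j : Int) :
    List Int × List Int × PySem.Set Int :=
  let l1' := PySem.List.pySetD st.1 i (PySem.List.pyGetD st.2.1 j 0)
  let l2' := PySem.List.pySetD st.2.1 j (PySem.List.pyGetD st.1 i 0)
  (l1', l2', PySem.Set.add st.2.2 (l1'.sum * l2'.sum))

def rescount (a : List Int) (b : List Int) : Int :=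
  let res : PySem.Set Int :=
    (PySem.List.pyRange 0 a.length 1).foldl
      (fun res i =>
        ((PySem.List.pyRange 0 b.length 1).foldl (rescountStep i) (a, b, res)).2.2)
      PySem.Set.empty
  PySem.Set.len res

-- ===== PORT B =====
def rescount_alt (a : List Int) (b : List Int) : Int :=
  let sA := a.sum
  let sB := b.sum
  let s : PySem.Set Int :=
    a.foldl
      (fun s x =>
        b.foldl (fun s y => PySem.Set.add s ((sA - x + y) * (sB + x - y))) s)
      PySem.Set.empty
  PySem.Set.len s

-- ===== PRECONDITION & SPEC =====
def Spec_rescount (a : List Int) (b : List Int) (out : Int) : Prop := out = rescount_alt a b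
instance (a : List Int) (b : List Int) (out : Int) : Decidable (Spec_rescount a b out) := by unfold Spec_rescount; infer_instance

-- ===== CLAIM (what is proved, stated in full; the proofs are below) =====
def Claim_equal_rescount : Prop := ∀ (a : List Int) (b : List Int), Dom_rescount a b → Spec_rescount a b (rescount a b)

-- ===== LEMMAS AND PROOFS =====

theorem sum_set_int (l : List Int) (i : Nat) (h : i < l.length) (v : Int) :
    (l.set i v).sum = l.sum - l[i] + v := by
  induction l generalizing i with
  | nil => simp at h
  | cons hd tl ih =>
    cases i with
    | zero => simp [List.set]; ring
    | succ n =>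
      simp only [List.set, List.sum_cons, List.getElem_cons_succ]
      rw [ih n (by simpa using h)]; ring

-- A's inner loop over j, starting at index j with cumulative-swap state (a.set i x, l2, res),
-- accumulates exactly the closed-form products over the remaining suffix of b.
theorem rescount_inner (a b : List Int) (i : Nat) (hi : i < a.length) :
    ∀ (n j : Nat), j + n = b.length →
    ∀ (x : Int) (l2 : List Int) (res : PySem.Set Int),
      l2.length = b.length →
      l2.drop j = b.drop j →
      l2.sum = b.sum + a[i] - x →
      ((PySem.List.pyRange (j : Int) (b.length : Int) 1).foldl
          (rescountStep (i : Int)) (a.set i x, l2, res)).2.2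
        = (b.drop j).foldl
            (fun s y => PySem.Set.add s ((a.sum - a[i] + y) * (b.sum + a[i] - y))) res := by
  intro n
  induction n with
  | zero =>
    intro j hj x l2 res _ _ _
    have hj' : j = b.length := by omega
    subst hj'
    rw [PySem.List.pyRange_one_eq_nil (le_refl _)]
    simp
  | succ m ih =>
    intro j hj x l2 res hlen hdrop hsum
    have hjb : j < b.length := by omega
    have hjl2 : j < l2.length := by omega
    rw [PySem.List.pyRange_one_cons (by exact_mod_cast hjb)]
    have hl2j : l2[j] = b[j] := by
      have h0 : (l2.drop j)[0]'(by simp; omega) = (b.drop j)[0]'(by simp; omega) := by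
        simp only [hdrop]
      simpa using h0
    have hstep : rescountStep (i : Int) (a.set i x, l2, res) (j : Int)
        = (a.set i b[j], l2.set j x,
            PySem.Set.add res ((a.set i b[j]).sum * (l2.set j x).sum)) := by
      have hget1 : PySem.List.pyGetD l2 (j : Int) 0 = b[j] := by
        rw [PySem.List.pyGetD_natCast, List.getD_eq_getElem _ _ hjl2, hl2j]
      have hget2 : PySem.List.pyGetD (a.set i x) (i : Int) 0 = x := by
        rw [PySem.List.pyGetD_natCast, List.getD_eq_getElem _ _ (by simpa using hi)]
        simp
      simp [rescountStep, hget1, hget2, List.set_set]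
    rw [List.foldl_cons, hstep]
    have hcast : ((j : Int) + 1) = ((j + 1 : Nat) : Int) := by push_cast; ring
    rw [hcast,
        ih (j + 1) (by omega) (b[j]) (l2.set j x)
          (PySem.Set.add res ((a.set i b[j]).sum * (l2.set j x).sum))
          (by simpa using hlen)
          (by
            have h1 : (l2.set j x).drop (j + 1) = l2.drop (j + 1) := by
              rw [List.drop_set]; simp
            have h2 : l2.drop (j + 1) = b.drop (j + 1) := by
              have h3 := congrArg (List.drop 1) hdrop
              simpa [List.drop_drop, Nat.add_comm] using h3
            rw [h1, h2])
          (by rw [sum_set_int l2 j hjl2 x, hl2j, hsum]; ring)]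
    have hdropj : b.drop j = b[j] :: b.drop (j + 1) :=
      List.drop_eq_getElem_cons hjb
    rw [hdropj, List.foldl_cons]
    congr 2
    rw [sum_set_int a i hi b[j], sum_set_int l2 j hjl2 x, hl2j, hsum]; ring

-- A's outer loop from index k equals B's fold over the corresponding suffix of a.
theorem rescount_outer (a b : List Int) :
    ∀ (n k : Nat), k + n = a.length →
    ∀ (res : PySem.Set Int),
      (PySem.List.pyRange (k : Int) (a.length : Int) 1).foldl
        (fun res i =>
          ((PySem.List.pyRange 0 (b.length : Int) 1).foldl (rescountStep i) (a, b, res)).2.2)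
        res
      = (a.drop k).foldl
          (fun s x =>
            b.foldl (fun s y => PySem.Set.add s ((a.sum - x + y) * (b.sum + x - y))) s)
          res := by
  intro n
  induction n with
  | zero =>
    intro k hk res
    have hk' : k = a.length := by omega
    subst hk'
    rw [PySem.List.pyRange_one_eq_nil (le_refl _)]
    simp
  | succ m ih =>
    intro k hk res
    have hka : k < a.length := by omega
    rw [PySem.List.pyRange_one_cons (show (k : Int) < (a.length : Int) by exact_mod_cast hka)]
    simp only [List.foldl_cons]
    have H := rescount_inner a b k hka b.length 0 (by omega) a[k] b res rfl rfl (by ring)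
    rw [List.set_getElem_self hka] at H
    simp only [Nat.cast_zero, List.drop_zero] at H
    rw [H]
    have hcast : ((k : Int) + 1) = ((k + 1 : Nat) : Int) := by push_cast; ring
    rw [hcast, ih (k + 1) (by omega)]
    have hdropk : a.drop k = a[k] :: a.drop (k + 1) := List.drop_eq_getElem_cons hka
    rw [hdropk, List.foldl_cons]

-- ===== VERDICT (by name: the statement is the Claim_ definition above) =====
theorem rescount_spec : Claim_equal_rescount := by
  intro a b _
  unfold Spec_rescount rescount rescount_alt
  simp only
  congr 1
  have H := rescount_outer a b a.length 0 (by omega) PySem.Set.empty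
  simpa using H
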